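-- pv_equiv track=rewrite | github.com/KEUMIN/algorithm_2024 | binary_search/150367_R.py | solution
-- ===== SOURCE A (Python) =====
-- def solution(numbers):
--     def is_valid_binary_tree(binary):
--         if len(binary) == 1:
--             return True
--         mid = len(binary) // 2
--         root = binary[mid]
--         left = binary[:mid]
--         right = binary[mid + 1 :]
--
--         if root == "0":
--             return "1" not in binary
--
--         return is_valid_binary_tree(left) and is_valid_binary_tree(right)
--
--     def can_represent(num):
--         if num == 1:
--             return True
--
--         binary = bin(num)[2:]
--         tree_height = len(binary).bit_length()
--         full_tree_size = 2**tree_height - 1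
--
--         binary = "0" * (full_tree_size - len(binary)) + binary
--
--         return is_valid_binary_tree(binary)
--
--     return [1 if can_represent(num) else 0 for num in numbers]
-- ===== SOURCE B (Python) =====
-- def solution(numbers):
--     def can_represent(num):
--         if num == 1:
--             return True
--
--         binary = bin(num)[2:]
--         tree_height = len(binary).bit_length()
--         full_tree_size = 2**tree_height - 1
--         binary = "0" * (full_tree_size - len(binary)) + binary
--
--         # iterative DFS over index ranges [lo, hi) instead of A's recursion on slices
--         stack = [(0, len(binary))]
--         while stack:
--             lo, hi = stack.pop()
--             n = hi - lo
--             if n <= 1: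
--                 continue
--             mid = lo + n // 2
--             if binary[mid] == "0":
--                 if "1" in binary[lo:hi]:
--                     return False
--             else:
--                 stack.append((mid + 1, hi))
--                 stack.append((lo, mid))
--         return True
--
--     return [1 if can_represent(num) else 0 for num in numbers]
-- ===== Notes on version B (the rewrite author's own statement) =====
-- stated objective: alternative
-- what changed: A's recursive is_valid_binary_tree on string slices is replaced by an iterative DFS over an explicit stack of (lo, hi) index ranges on the padded binary string; the padding/bit_length preamble is unchanged.
import Mathlib
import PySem

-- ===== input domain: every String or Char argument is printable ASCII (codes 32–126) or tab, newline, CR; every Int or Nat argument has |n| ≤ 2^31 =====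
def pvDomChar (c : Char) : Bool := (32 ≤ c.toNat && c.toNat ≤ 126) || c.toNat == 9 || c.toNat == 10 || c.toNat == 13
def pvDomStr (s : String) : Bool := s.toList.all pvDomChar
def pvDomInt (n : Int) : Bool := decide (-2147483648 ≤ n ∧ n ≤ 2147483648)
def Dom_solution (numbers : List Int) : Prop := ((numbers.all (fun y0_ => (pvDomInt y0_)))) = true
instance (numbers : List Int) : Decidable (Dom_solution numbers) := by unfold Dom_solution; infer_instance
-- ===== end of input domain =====

-- B replaces A's slice-and-recurse tree check by an iterative DFS over an explicit
-- stack of index ranges on the padded string (alternative decomposition, same cost).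

-- ===== PORT A =====

-- binary digits of a natural number, msb first (bin(n)[2:] for n > 0)
def bitsOf : Nat → List Char
  | 0 => []
  | n + 1 => bitsOf ((n + 1) / 2) ++ [if (n + 1) % 2 == 1 then '1' else '0']

-- bin(num)[2:]  (for num < 0 Python gives '-0b…', so [2:] keeps the 'b')
def binDigits (num : Int) : List Char :=
  if num == 0 then ['0']
  else if num < 0 then 'b' :: bitsOf (-num).toNat
  else bitsOf num.toNat

-- Python int.bit_length() on a Nat
def bitLen : Nat → Nat
  | 0 => 0
  | n + 1 => bitLen ((n + 1) / 2) + 1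

-- the zero-padded binary string both versions build before checking it
def paddedBin (num : Int) : List Char :=
  let binary := binDigits num
  let full := 2 ^ bitLen binary.length - 1
  List.replicate (full - binary.length) '0' ++ binary

-- A's recursive is_valid_binary_tree
def isValidTree (l : List Char) : Bool :=
  if l.length == 1 then true
  else
    match h : l[l.length / 2]? with
    | none => true   -- Python raises IndexError here; unreachable from solution
    | some root =>
      if root == '0' then !(l.contains '1')
      else isValidTree (l.take (l.length / 2)) && isValidTree (l.drop (l.length / 2 + 1))
termination_by l.length
decreasing_by
  all_goals
    obtain ⟨hlt, -⟩ := List.getElem?_eq_some_iff.mp h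
    simp only [List.length_take, List.length_drop]
    omega

def canRepresent (num : Int) : Bool :=
  if num == 1 then true else isValidTree (paddedBin num)

def solution (numbers : List Int) : List Int :=
  numbers.map (fun num => if canRepresent num then 1 else 0)

-- ===== PORT B =====

-- B's while loop over the explicit stack of [lo, hi) ranges
def checkStack (l : List Char) : List (Nat × Nat) → Bool
  | [] => true
  | (lo, hi) :: rest =>
    if hi - lo ≤ 1 then checkStack l rest
    else
      let mid := lo + (hi - lo) / 2
      if l[mid]?.getD ' ' == '0' then   -- index in range on every call reachable from solution_alt
        if ((l.drop lo).take (hi - lo)).contains '1' then false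
        else checkStack l rest
      else checkStack l ((lo, mid) :: (mid + 1, hi) :: rest)
termination_by stack => (stack.map (fun p => 2 * (p.2 - p.1) + 1)).sum
decreasing_by
  all_goals simp
  all_goals omega

def canRepresentAlt (num : Int) : Bool :=
  if num == 1 then true
  else
    let binary := paddedBin num
    checkStack binary [(0, binary.length)]

def solution_alt (numbers : List Int) : List Int :=
  numbers.map (fun num => if canRepresentAlt num then 1 else 0)

-- ===== PRECONDITION & SPEC =====
def Spec_solution (numbers : List Int) (out : List Int) : Prop := out = solution_alt numbers
instance (numbers : List Int) (out : List Int) : Decidable (Spec_solution numbers out) := by unfold Spec_solution; infer_instance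

-- ===== CLAIM (what is proved, stated in full; the proofs are below) =====
def Claim_equal_solution : Prop := ∀ (numbers : List Int), Dom_solution numbers → Spec_solution numbers (solution numbers)

-- ===== LEMMAS AND PROOFS =====

theorem isValid_small (l : List Char) (h : l.length ≤ 1) : isValidTree l = true := by
  match l, h with
  | [], _ => rw [isValidTree]; rfl
  | [a], _ => rw [isValidTree]; rfl

theorem isValid_step (l : List Char) (root : Char) (h1 : l.length ≠ 1)
    (hget : l[l.length / 2]? = some root) :
    isValidTree l
      = (if root == '0' then !(l.contains '1')
         else isValidTree (l.take (l.length / 2)) && isValidTree (l.drop (l.length / 2 + 1))) := by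
  rw [isValidTree]
  have hne : (l.length == 1) = false := by simp [h1]
  rw [hne]
  simp only [Bool.false_eq_true, if_false]
  split
  · next heq => rw [heq] at hget; cases hget
  · next r heq => rw [heq] at hget; injection hget with h; rw [h]

theorem checkStack_cons (k : Nat) : ∀ (l : List Char) (lo hi : Nat) (rest : List (Nat × Nat)),
    hi - lo ≤ k → hi ≤ l.length →
    checkStack l ((lo, hi) :: rest)
      = (isValidTree ((l.drop lo).take (hi - lo)) && checkStack l rest) := by
  induction k with
  | zero =>
    intro l lo hi rest hk hlen
    rw [checkStack, if_pos (by omega : hi - lo ≤ 1),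
        isValid_small _ (by simp; omega), Bool.true_and]
  | succ k ih =>
    intro l lo hi rest hk hlen
    by_cases hn : hi - lo ≤ 1
    · rw [checkStack, if_pos hn, isValid_small _ (by simp; omega), Bool.true_and]
    · have h2 : 2 ≤ hi - lo := by omega
      have hmidhi : lo + (hi - lo) / 2 < hi := by omega
      have hmid : lo + (hi - lo) / 2 < l.length := by omega
      have hseglen : ((l.drop lo).take (hi - lo)).length = hi - lo := by simp; omega
      have hstep := isValid_step ((l.drop lo).take (hi - lo)) (l[lo + (hi - lo) / 2]'hmid)
        (by omega) (by
          rw [hseglen, List.getElem?_take, if_pos (by omega), List.getElem?_drop,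
              List.getElem?_eq_getElem hmid])
      rw [hseglen] at hstep
      rw [checkStack, if_neg hn, hstep]
      simp only [List.getElem?_eq_getElem hmid, Option.getD_some]
      by_cases hroot : (l[lo + (hi - lo) / 2]'hmid == '0') = true
      · rw [if_pos hroot, if_pos hroot]
        cases hc : ((l.drop lo).take (hi - lo)).contains '1' <;> simp
      · rw [if_neg hroot, if_neg hroot]
        rw [ih l lo (lo + (hi - lo) / 2) _ (by omega) (by omega),
            ih l (lo + (hi - lo) / 2 + 1) hi rest (by omega) hlen]
        have hleft : ((l.drop lo).take (hi - lo)).take ((hi - lo) / 2)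
            = (l.drop lo).take (lo + (hi - lo) / 2 - lo) := by
          rw [List.take_take]
          congr 1
          omega
        have hright : ((l.drop lo).take (hi - lo)).drop ((hi - lo) / 2 + 1)
            = (l.drop (lo + (hi - lo) / 2 + 1)).take (hi - (lo + (hi - lo) / 2 + 1)) := by
          have e1 : hi - lo - ((hi - lo) / 2 + 1) = hi - (lo + (hi - lo) / 2 + 1) := by omega
          have e2 : lo + ((hi - lo) / 2 + 1) = lo + (hi - lo) / 2 + 1 := by omega
          rw [List.drop_take, List.drop_drop, e1, e2]
        rw [hleft, hright, Bool.and_assoc]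

theorem canRep_eq (num : Int) : canRepresentAlt num = canRepresent num := by
  unfold canRepresentAlt canRepresent
  by_cases h1 : num = 1
  · simp [h1]
  · have hb : (num == 1) = false := by simp [h1]
    rw [hb]
    simp only [Bool.false_eq_true, if_false]
    rw [checkStack_cons (paddedBin num).length _ 0 _ [] (by omega) (by omega)]
    rw [List.drop_zero, Nat.sub_zero, List.take_length]
    rw [checkStack, Bool.and_true]

-- ===== VERDICT (by name: the statement is the Claim_ definition above) =====
theorem solution_spec : Claim_equal_solution := by
  intro numbers _
  unfold Spec_solution solution solution_alt
  simp [canRep_eq]
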